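-- pv_equiv track=rewrite | github.com/kimsh8337/daliy-coding | Programmers/Level1/과일장수.py | solution
-- ===== SOURCE A (Python) =====
-- def solution(k, m, score):
--     answer = 0
--
--     # 큰 수부터 상자를 몇개 만들 수 있는지 확인
--     score = sorted(score, reverse=True)
--
--     idx = 0
--     while len(score) - idx >= m:
--         answer += min(score[idx:idx+m]) * m
--         idx += m
--
--     return answer
-- ===== SOURCE B (Python) =====
-- def solution(k, m, score):
--     freq = {}
--     for s in score:
--         freq[s] = freq.get(s, 0) + 1
--     answer = 0
--     c = 0
--     for g in sorted(freq, reverse=True):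
--         c2 = c + freq[g]
--         answer += g * m * (c2 // m - c // m)
--         c = c2
--     return answer
-- ===== Notes on version B (the rewrite author's own statement) =====
-- stated objective: alternative
-- what changed: Replaces sort-the-whole-list-then-min-over-each-m-slice with a frequency table over distinct grades scanned from highest grade down, adding grade*m for each box boundary (multiple of m) falling inside that grade's cumulative span; only the distinct grades are sorted.
import Mathlib
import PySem

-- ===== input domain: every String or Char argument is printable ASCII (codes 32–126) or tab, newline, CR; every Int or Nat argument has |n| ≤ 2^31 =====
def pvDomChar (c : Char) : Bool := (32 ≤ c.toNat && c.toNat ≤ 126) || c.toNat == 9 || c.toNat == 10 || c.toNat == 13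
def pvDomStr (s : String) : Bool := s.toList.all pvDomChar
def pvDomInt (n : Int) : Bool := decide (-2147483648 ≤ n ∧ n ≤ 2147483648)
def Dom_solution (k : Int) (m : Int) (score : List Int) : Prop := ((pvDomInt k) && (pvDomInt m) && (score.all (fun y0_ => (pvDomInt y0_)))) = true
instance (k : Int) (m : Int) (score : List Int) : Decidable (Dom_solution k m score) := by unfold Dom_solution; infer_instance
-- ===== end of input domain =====

-- B replaces A's sort-then-slice-per-box loop by a frequency table of the grades,
-- scanned from the highest grade down with a cumulative count; each box boundary
-- (multiple of m) inside a grade's span contributes grade*m.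

-- ===== PORT A =====
-- A's while loop; fuel bounds the iterations (length+1 suffices under Pre_)
def solutionGo (m : Int) (s : List Int) : Nat → Int → Int → Int
  | 0, _, answer => answer
  | fuel+1, idx, answer =>
    if (s.length : Int) - idx ≥ m then
      match PySem.List.min? (PySem.List.slice s (some idx) (some (idx + m))) (fun x => x) with
      | some mn => solutionGo m s fuel (idx + m) (answer + mn * m)
      | none => answer   -- Python raises ValueError here (empty slice; only reachable when m ≤ 0, outside Pre_)
    else answer

def solution (k : Int) (m : Int) (score : List Int) : Int :=
  let score := PySem.List.sorted score (fun x => x) true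
  solutionGo m score (score.length + 1) 0 0

-- ===== PORT B =====
def solution_alt (k : Int) (m : Int) (score : List Int) : Int :=
  let freq := score.foldl (fun d s => d.insert s (d.getD s 0 + 1)) PySem.Dict.empty
  let ks := PySem.List.sorted freq.keys (fun x => x) true
  (ks.foldl (fun (p : Int × Int) g =>
      let c2 := p.2 + freq.getD g 0
      (p.1 + g * m * (PySem.Int.floordiv c2 m - PySem.Int.floordiv p.2 m), c2)) (0, 0)).1

-- ===== PRECONDITION & SPEC =====
-- A raises ValueError (min of an empty slice) for every m ≤ 0; Pre_ keeps exactly the inputs where A returns.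
def Pre_solution (k : Int) (m : Int) (score : List Int) : Prop := 1 ≤ m
instance (k : Int) (m : Int) (score : List Int) : Decidable (Pre_solution k m score) := by unfold Pre_solution; infer_instance
def pvWitness_solution : Int × Int × List Int := (4, 3, [1, 2, 3, 1, 2, 3, 1])

def Spec_solution (k : Int) (m : Int) (score : List Int) (out : Int) : Prop := out = solution_alt k m score
instance (k : Int) (m : Int) (score : List Int) (out : Int) : Decidable (Spec_solution k m score out) := by unfold Spec_solution; infer_instance

-- ===== CLAIM (what is proved, stated in full; the proofs are below) =====
def Claim_equal_solution : Prop := ∀ (k : Int) (m : Int) (score : List Int), Dom_solution k m score → Pre_solution k m score → Spec_solution k m score (solution k m score)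

-- ===== LEMMAS AND PROOFS =====

-- the minimum of a nonempty ≥-sorted (descending) list is its last element
lemma min_antitone_last (s : List Int) (hs : s.Pairwise (· ≥ ·)) (hne : s ≠ []) :
    PySem.List.min? s (fun x => x) = some (s.getLast hne) := by
  cases hmin : PySem.List.min? s (fun x => x) with
  | none => exact absurd ((PySem.List.min?_eq_none_iff s _).1 hmin) hne
  | some v =>
    have hvmem := PySem.List.min?_mem hmin
    have hvmin := PySem.List.min?_isMin hmin
    have h1 : v ≤ s.getLast hne := hvmin _ (List.getLast_mem hne)
    have h2 : s.getLast hne ≤ v := by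
      have hsplit : s.dropLast ++ [s.getLast hne] = s := List.dropLast_concat_getLast hne
      rw [← hsplit] at hs hvmem
      rcases List.mem_append.1 hvmem with h | h
      · exact (List.pairwise_append.1 hs).2.2 v h _ (List.mem_singleton_self _)
      · simp at h; omega
    exact congrArg some (le_antisymm h1 h2)

-- A's while loop accumulates, for each box boundary, the element at that boundary times m
lemma loopA_eq_sum (M : Nat) (hM : 0 < M) (s : List Int) (hs : s.Pairwise (· ≥ ·)) :
    ∀ (fuel j : Nat) (ans : Int), s.length + 1 - j ≤ fuel →
      solutionGo (M : Int) s fuel (j : Int) ans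
        = ans + (∑ i ∈ Finset.range ((s.length - j)/M), s.getD (j + (i+1)*M - 1) 0) * (M : Int) := by
  intro fuel
  induction fuel with
  | zero =>
    intro j ans hf
    have : (s.length - j)/M = 0 := by apply Nat.div_eq_of_lt; omega
    rw [this]
    simp [solutionGo]
  | succ fuel ih =>
    intro j ans hf
    rw [solutionGo]
    by_cases hcond : (s.length : Int) - (j : Int) ≥ (M : Int)
    · have hjM : j + M ≤ s.length := by omega
      rw [if_pos hcond]
      have hslice : PySem.List.slice s (some (j : Int)) (some ((j : Int) + (M : Int)))
          = (s.drop j).take M := PySem.List.slice_natCast_add s j M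
      have hlen : ((s.drop j).take M).length = M := by
        simp [List.length_take, List.length_drop]; omega
      have hne : (s.drop j).take M ≠ [] := by
        intro h; rw [h] at hlen; simp at hlen; omega
      have hpair : ((s.drop j).take M).Pairwise (· ≥ ·) :=
        ((hs.sublist (List.drop_sublist j s)).sublist (List.take_sublist M _))
      have hlast : ((s.drop j).take M).getLast hne = s.getD (j + M - 1) 0 := by
        have hidx : j + M - 1 < s.length := by omega
        rw [List.getLast_eq_getElem, List.getD_eq_getElem _ _ hidx]
        simp only [hlen, List.getElem_take, List.getElem_drop]
        congr 1
        omega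
      rw [hslice, min_antitone_last _ hpair hne, hlast]
      have hcast : (j : Int) + (M : Int) = ((j + M : Nat) : Int) := by push_cast; ring
      dsimp only
      rw [hcast, ih (j + M) _ (by omega)]
      have hq : (s.length - j)/M = (s.length - (j+M))/M + 1 := by
        rw [Nat.div_eq_sub_div hM (by omega : M ≤ s.length - j)]
        congr 2
        omega
      rw [hq, Finset.sum_range_succ']
      have hsc : ∀ i ∈ Finset.range ((s.length - (j+M))/M),
          s.getD (j + (i + 1 + 1) * M - 1) 0 = s.getD (j + M + (i + 1) * M - 1) 0 := by
        intro i _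
        congr 1
        ring_nf
      rw [Finset.sum_congr rfl hsc]
      have hf0 : s.getD (j + 1 * M - 1) 0 = s.getD (j + M - 1) 0 := by
        congr 1
        omega
      rw [hf0]
      ring
    · rw [if_neg hcond]
      have hz : (s.length - j)/M = 0 := by apply Nat.div_eq_of_lt; omega
      rw [hz]
      simp

-- the concatenation of each distinct grade's copies, in the given grade order
def flatC (score : List Int) (ks : List Int) : List Int :=
  ks.flatMap (fun g => List.replicate (score.count g) g)

-- B's fold accumulates, for each box boundary within the cumulative span, the group's grade times m
lemma foldB_eq_sum (score : List Int) (M : Nat) (hM : 0 < M) :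
    ∀ (ks : List Int) (c : Nat) (a : Int),
      ks.foldl (fun (p : Int × Int) g =>
          (p.1 + g * (M : Int) * (PySem.Int.floordiv (p.2 + (score.count g : Int)) (M : Int)
              - PySem.Int.floordiv p.2 (M : Int)), p.2 + (score.count g : Int)))
        (a, (c : Int))
      = (a + (∑ i ∈ Finset.range ((c + (flatC score ks).length)/M - c/M),
              (flatC score ks).getD ((i + 1 + c/M)*M - 1 - c) 0) * (M : Int),
         ((c + (flatC score ks).length : Nat) : Int)) := by
  intro ks
  induction ks with
  | nil => intro c a; simp [flatC]
  | cons v rest ih =>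
    intro c a
    rw [List.foldl_cons]
    have hc2 : (c : Int) + ((score.count v : Nat) : Int) = ((c + score.count v : Nat) : Int) := by
      push_cast; ring
    simp only [hc2, PySem.Int.floordiv_natCast]
    rw [ih (c + score.count v)]
    set cnt := score.count v with hcnt
    have hmono1 : c/M ≤ (c+cnt)/M := Nat.div_le_div_right (by omega)
    have hmono2 : (c+cnt)/M ≤ (c + cnt + (flatC score rest).length)/M := Nat.div_le_div_right (by omega)
    have hlen : (flatC score (v :: rest)).length = cnt + (flatC score rest).length := by
      simp [flatC, ← hcnt]
    have hd : (c + (flatC score (v :: rest)).length)/M - c/M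
        = ((c+cnt)/M - c/M) + ((c + cnt + (flatC score rest).length)/M - (c+cnt)/M) := by
      rw [hlen]
      have : c + (cnt + (flatC score rest).length) = c + cnt + (flatC score rest).length := by omega
      rw [this]
      omega
    rw [hd, Finset.sum_range_add]
    -- first block of boundaries: they fall inside this grade's replicate block
    have hfirst : ∀ i ∈ Finset.range ((c+cnt)/M - c/M),
        (flatC score (v :: rest)).getD ((i + 1 + c/M)*M - 1 - c) 0 = v := by
      intro i hi
      rw [Finset.mem_range] at hi
      have hub : (i + 1 + c/M) * M ≤ ((c+cnt)/M) * M := Nat.mul_le_mul_right M (by omega)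
      have hub2 : ((c+cnt)/M) * M ≤ c + cnt := Nat.div_mul_le_self _ _
      have hlb : (1 + c/M) * M ≤ (i + 1 + c/M) * M := Nat.mul_le_mul_right M (by omega)
      have hlb2 : c < (1 + c/M) * M := by
        have h1 := Nat.div_add_mod c M
        have h2 := Nat.mod_lt c hM
        have h3 : (1 + c/M) * M = M * (c/M) + M := by ring
        omega
      have hidx : (i + 1 + c/M)*M - 1 - c < cnt := by omega
      show (List.replicate cnt v ++ flatC score rest).getD _ 0 = v
      rw [List.getD_append _ _ _ _ (by simp [hidx])]
      simp [List.getD, hidx]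
    rw [Finset.sum_congr rfl hfirst]
    -- remaining boundaries: shift into the rest of the grades
    have hrest : ∀ i ∈ Finset.range ((c + cnt + (flatC score rest).length)/M - (c+cnt)/M),
        (flatC score (v :: rest)).getD ((((c+cnt)/M - c/M) + i + 1 + c/M)*M - 1 - c) 0
          = (flatC score rest).getD ((i + 1 + (c+cnt)/M)*M - 1 - (c+cnt)) 0 := by
      intro i hi
      have hshift : ((c+cnt)/M - c/M) + i + 1 + c/M = i + 1 + (c+cnt)/M := by omega
      rw [hshift]
      have hlb : ((c+cnt)/M + 1) * M ≤ (i + 1 + (c+cnt)/M) * M := Nat.mul_le_mul_right M (by omega)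
      have hlb2 : c + cnt < ((c+cnt)/M + 1) * M := by
        have h1 := Nat.div_add_mod (c+cnt) M
        have h2 := Nat.mod_lt (c+cnt) hM
        have h3 : ((c+cnt)/M + 1) * M = M * ((c+cnt)/M) + M := by ring
        omega
      show (List.replicate cnt v ++ flatC score rest).getD _ 0 = _
      rw [List.getD_append_right _ _ _ _ (by simpa using (by omega : cnt ≤ (i + 1 + (c+cnt)/M)*M - 1 - c))]
      congr 1
      simp
      omega
    rw [Finset.sum_congr rfl hrest]
    simp only [Finset.sum_const, Finset.card_range, nsmul_eq_mul, Prod.mk.injEq]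
    constructor
    · push_cast [hmono1]
      ring
    · congr 1
      omega

lemma count_flat (score : List Int) (ks : List Int) (hnd : ks.Nodup) (v : Int) :
    (flatC score ks).count v = if v ∈ ks then score.count v else 0 := by
  induction ks with
  | nil => simp [flatC]
  | cons g rest ih =>
    rw [List.nodup_cons] at hnd
    simp only [flatC, List.flatMap_cons, List.count_append, List.count_replicate]
    rw [show rest.flatMap (fun g => List.replicate (score.count g) g)
        = flatC score rest from rfl, ih hnd.2]
    by_cases hvg : v = g
    · subst hvg
      simp [hnd.1]
    · simp [hvg, Ne.symm hvg]

-- the flattened groups over the distinct grades sorted descending ARE the sorted-descending list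
lemma flat_eq_sorted (score : List Int) :
    flatC score (PySem.List.sorted (PySem.Set.ofList score) (fun x => x) true)
      = PySem.List.sorted score (fun x => x) true := by
  set ks := PySem.List.sorted (PySem.Set.ofList score) (fun x => x) true with hks
  have hnd : ks.Nodup := ((PySem.List.sorted_perm _ _ _).nodup_iff).2 (PySem.Set.nodup_ofList score)
  have hmem : ∀ v, v ∈ ks ↔ v ∈ score := by
    intro v
    rw [hks, PySem.List.mem_sorted, PySem.Set.mem_ofList]
  have hperm1 : (flatC score ks).Perm score := by
    rw [List.perm_iff_count]
    intro v
    rw [count_flat score ks hnd v]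
    by_cases hv : v ∈ score
    · simp [(hmem v).2 hv]
    · simp [List.count_eq_zero_of_not_mem hv]
  have hperm : (flatC score ks).Perm (PySem.List.sorted score (fun x => x) true) :=
    hperm1.trans (PySem.List.sorted_perm _ _ _).symm
  have hks_gt : ks.Pairwise (· > ·) := by
    have h1 : ks.Pairwise (· ≥ ·) := PySem.List.sorted_pairwise_rev _ _
    have h2 : ks.Pairwise (· ≠ ·) := hnd
    exact (h1.and h2).imp (fun h => lt_of_le_of_ne h.1.le (Ne.symm h.2))
  have hflat : (flatC score ks).Pairwise (· ≥ ·) := by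
    rw [flatC, List.pairwise_flatMap]
    constructor
    · intro a _; exact List.pairwise_replicate_of_refl
    · exact hks_gt.imp (fun {a b} h x hx y hy => by
        simp only [List.eq_of_mem_replicate hx, List.eq_of_mem_replicate hy]
        exact le_of_lt h)
  have hsorted : (PySem.List.sorted score (fun x => x) true).Pairwise (· ≥ ·) :=
    PySem.List.sorted_pairwise_rev _ _
  exact hperm.eq_of_pairwise (fun a b _ _ h1 h2 => le_antisymm h2 h1) hflat hsorted

-- A's value, in closed form over the sorted-descending list
lemma solutionA_eq (M : Nat) (hM : 0 < M) (k : Int) (score : List Int) :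
    solution k (M : Int) score
      = (∑ i ∈ Finset.range ((PySem.List.sorted score (fun x => x) true).length / M),
          (PySem.List.sorted score (fun x => x) true).getD ((i+1)*M - 1) 0) * (M : Int) := by
  unfold solution
  set t := PySem.List.sorted score (fun x => x) true with ht
  have hs : t.Pairwise (· ≥ ·) := PySem.List.sorted_pairwise_rev _ _
  have h := loopA_eq_sum M hM t hs (t.length + 1) 0 0 (by omega)
  rw [show ((0 : Nat) : Int) = 0 from rfl] at h
  rw [h]
  simp

-- B's value, in the same closed form
lemma solutionB_eq (M : Nat) (hM : 0 < M) (k : Int) (score : List Int) :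
    solution_alt k (M : Int) score
      = (∑ i ∈ Finset.range ((PySem.List.sorted score (fun x => x) true).length / M),
          (PySem.List.sorted score (fun x => x) true).getD ((i+1)*M - 1) 0) * (M : Int) := by
  unfold solution_alt
  simp only [PySem.Dict.foldl_insert_getD_add_one_eq_counter, PySem.Dict.keys_counter,
    PySem.Dict.getD_counter]
  set ks := PySem.List.sorted (PySem.Set.ofList score) (fun x => x) true with hks
  have h := foldB_eq_sum score M hM ks 0 0
  rw [show ((0 : Nat) : Int) = 0 from rfl] at h
  rw [flat_eq_sorted score] at h
  set t := PySem.List.sorted score (fun x => x) true with ht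
  rw [h]
  simp only [Nat.zero_div, Nat.sub_zero, Nat.add_zero, zero_add]

-- ===== VERDICT (by name: the statement is the Claim_ definition above) =====
theorem solution_spec : Claim_equal_solution := by
  intro k m score _ hpre
  unfold Pre_solution at hpre
  lift m to Nat using (by omega : (0 : Int) ≤ m) with M
  have hM : 0 < M := by exact_mod_cast hpre
  unfold Spec_solution
  rw [solutionA_eq M hM, solutionB_eq M hM]
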